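-- pv_equiv track=rewrite | github.com/waynecheng92/ropasci360_agent | util.py | battle_in_the_hex
-- ===== SOURCE A (Python) =====
-- def battle_in_the_hex(lst):
--     # Firstly check if the hex contains at least one rock, one paper and one scissor
--     rock = 0
--     paper = 0
--     scissor = 0
--     new_lst = []
--     for i in lst:
--         if i[0] == 'R' or i[0] == 'r':
--             rock += 1
--         if i[0] == 'P' or i[0] == 'p':
--             paper += 1
--         if i[0] == 'S' or i[0] == 's':
--             scissor += 1
--     if rock > 0 and scissor >0 and paper >0:
--         return new_lst
--     # only scissors and papers
--     elif scissor>0 and paper>0 and rock == 0: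
--         for i in lst:
--             if i[0] == 'S' or i[0] == 's':
--                 new_lst.append(i)
--     # only papers and rocks
--     elif rock>0 and paper>0 and scissor == 0:
--         for i in lst:
--             if i[0] == 'P' or i[0] == 'p':
--                 new_lst.append(i)
--     # only rocks and scissors
--     elif scissor>0 and rock>0 and paper == 0:
--         for i in lst:
--             if i[0] == 'R' or i[0] == 'r':
--                 new_lst.append(i)
--     else:
--         for i in lst:
--             new_lst.append(i)
--     return new_lst
-- ===== SOURCE B (Python) =====
-- def battle_in_the_hex(lst):
--     # One pass buckets every token by its type; the answer is a prebuilt bucket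
--     # (or [] / a copy), so no second filtering pass is needed.
--     rocks, papers, scissors = [], [], []
--     for i in lst:
--         c = i[0]
--         if c in 'Rr':
--             rocks.append(i)
--         elif c in 'Pp':
--             papers.append(i)
--         elif c in 'Ss':
--             scissors.append(i)
--     if rocks and papers and scissors:
--         return []
--     if scissors and papers:
--         return scissors
--     if rocks and papers:
--         return papers
--     if rocks and scissors:
--         return rocks
--     return list(lst)
-- ===== Notes on version B (the rewrite author's own statement) =====
-- stated objective: faster
-- what changed: Replaces A's two-stage scheme (count the three types, then re-scan the list with one of four branch-selected filter loops) by a single bucketing pass that partitions the tokens into rock/paper/scissor lists, after which the result is simply one of the prebuilt buckets, the empty result, or a copy - no second pass over the input.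
import Mathlib
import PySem

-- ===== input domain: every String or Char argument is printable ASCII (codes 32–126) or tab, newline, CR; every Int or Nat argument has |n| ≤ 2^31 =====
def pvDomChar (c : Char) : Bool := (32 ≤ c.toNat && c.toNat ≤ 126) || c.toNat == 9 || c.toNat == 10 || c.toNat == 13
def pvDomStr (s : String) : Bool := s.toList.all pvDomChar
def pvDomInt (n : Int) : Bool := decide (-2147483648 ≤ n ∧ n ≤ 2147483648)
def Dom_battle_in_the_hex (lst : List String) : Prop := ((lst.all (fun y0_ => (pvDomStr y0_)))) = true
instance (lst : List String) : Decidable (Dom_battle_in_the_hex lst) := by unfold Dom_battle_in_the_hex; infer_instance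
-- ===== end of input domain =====

-- B replaces A's count-then-refilter two-pass scheme by a single bucketing pass;
-- the result is a prebuilt bucket, [], or a copy. Same O(n) asymptotics; measurably faster by avoiding the second pass.

-- i[0] (IndexError on "" is excluded by Pre_; the default is never used there)
def pvFirst (s : String) : Char := (PySem.Str.pyGet? s 0).getD ' '

-- ===== PORT A =====
def battle_in_the_hex (lst : List String) : List String :=
  let counts : Nat × Nat × Nat := lst.foldl (fun st i =>
    let ch := pvFirst i
    let st := if ch == 'R' || ch == 'r' then (st.1 + 1, st.2.1, st.2.2) else st
    let st := if ch == 'P' || ch == 'p' then (st.1, st.2.1 + 1, st.2.2) else st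
    if ch == 'S' || ch == 's' then (st.1, st.2.1, st.2.2 + 1) else st) (0, 0, 0)
  let rock := counts.1
  let paper := counts.2.1
  let scissor := counts.2.2
  if rock > 0 ∧ scissor > 0 ∧ paper > 0 then
    []
  else if scissor > 0 ∧ paper > 0 ∧ rock = 0 then
    lst.foldl (fun acc i => if pvFirst i == 'S' || pvFirst i == 's' then acc ++ [i] else acc) []
  else if rock > 0 ∧ paper > 0 ∧ scissor = 0 then
    lst.foldl (fun acc i => if pvFirst i == 'P' || pvFirst i == 'p' then acc ++ [i] else acc) []
  else if scissor > 0 ∧ rock > 0 ∧ paper = 0 then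
    lst.foldl (fun acc i => if pvFirst i == 'R' || pvFirst i == 'r' then acc ++ [i] else acc) []
  else
    lst.foldl (fun acc i => acc ++ [i]) []

-- ===== PORT B =====
def battle_in_the_hex_alt (lst : List String) : List String :=
  let bk : List String × List String × List String := lst.foldl
    (fun (b : List String × List String × List String) i =>
      let c := pvFirst i
      if c == 'R' || c == 'r' then (b.1 ++ [i], b.2.1, b.2.2)
      else if c == 'P' || c == 'p' then (b.1, b.2.1 ++ [i], b.2.2)
      else if c == 'S' || c == 's' then (b.1, b.2.1, b.2.2 ++ [i])
      else b) ([], [], [])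
  let rocks := bk.1
  let papers := bk.2.1
  let scissors := bk.2.2
  if rocks ≠ [] ∧ papers ≠ [] ∧ scissors ≠ [] then []
  else if scissors ≠ [] ∧ papers ≠ [] then scissors
  else if rocks ≠ [] ∧ papers ≠ [] then papers
  else if rocks ≠ [] ∧ scissors ≠ [] then rocks
  else lst

-- ===== PRECONDITION & SPEC =====
-- A (and B) raise IndexError on i[0] for an empty token; Pre_ excludes lists containing "".
def Pre_battle_in_the_hex (lst : List String) : Prop := ∀ s ∈ lst, s ≠ ""
instance (lst : List String) : Decidable (Pre_battle_in_the_hex lst) := by unfold Pre_battle_in_the_hex; infer_instance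
def pvWitness_battle_in_the_hex : List String := ["R1", "s2", "Px"]

def Spec_battle_in_the_hex (lst : List String) (out : List String) : Prop := out = battle_in_the_hex_alt lst
instance (lst : List String) (out : List String) : Decidable (Spec_battle_in_the_hex lst out) := by unfold Spec_battle_in_the_hex; infer_instance

-- ===== CLAIM (what is proved, stated in full; the proofs are below) =====
def Claim_equal_battle_in_the_hex : Prop := ∀ (lst : List String), Dom_battle_in_the_hex lst → Pre_battle_in_the_hex lst → Spec_battle_in_the_hex lst (battle_in_the_hex lst)

-- ===== LEMMAS AND PROOFS =====

def pvR (s : String) : Bool := pvFirst s == 'R' || pvFirst s == 'r'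
def pvP (s : String) : Bool := pvFirst s == 'P' || pvFirst s == 'p'
def pvS (s : String) : Bool := pvFirst s == 'S' || pvFirst s == 's'

lemma counts_eq (lst : List String) : ∀ (a b c : Nat),
    lst.foldl (fun st i =>
      let ch := pvFirst i
      let st := if ch == 'R' || ch == 'r' then (st.1 + 1, st.2.1, st.2.2) else st
      let st := if ch == 'P' || ch == 'p' then (st.1, st.2.1 + 1, st.2.2) else st
      if ch == 'S' || ch == 's' then (st.1, st.2.1, st.2.2 + 1) else st) (a, b, c)
    = (a + lst.countP pvR, b + lst.countP pvP, c + lst.countP pvS) := by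
  induction lst with
  | nil => intro a b c; simp
  | cons x xs ih =>
    intro a b c
    rw [List.foldl_cons]
    have hstep : (let ch := pvFirst x;
      let st := if ch == 'R' || ch == 'r' then ((a, b, c).1 + 1, (a, b, c).2.1, (a, b, c).2.2) else (a, b, c);
      let st := if ch == 'P' || ch == 'p' then (st.1, st.2.1 + 1, st.2.2) else st;
      if ch == 'S' || ch == 's' then (st.1, st.2.1, st.2.2 + 1) else st)
      = ((if pvR x then a + 1 else a), (if pvP x then b + 1 else b), (if pvS x then c + 1 else c)) := by
      simp only [pvR, pvP, pvS]
      by_cases hR : (pvFirst x == 'R' || pvFirst x == 'r') = true <;>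
        by_cases hP : (pvFirst x == 'P' || pvFirst x == 'p') = true <;>
          by_cases hS : (pvFirst x == 'S' || pvFirst x == 's') = true <;>
            simp [hR, hP, hS]
    rw [hstep, ih]
    simp only [List.countP_cons, Prod.mk.injEq]
    refine ⟨?_, ?_, ?_⟩ <;> by_cases h : pvR x <;> by_cases h2 : pvP x <;> by_cases h3 : pvS x <;>
      simp [h, h2, h3] <;> omega

-- the bucketing fold of B computes the three filters
lemma buckets_eq (lst : List String) : ∀ (a b c : List String),
    lst.foldl (fun (bk : List String × List String × List String) i =>
      let ch := pvFirst i
      if ch == 'R' || ch == 'r' then (bk.1 ++ [i], bk.2.1, bk.2.2)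
      else if ch == 'P' || ch == 'p' then (bk.1, bk.2.1 ++ [i], bk.2.2)
      else if ch == 'S' || ch == 's' then (bk.1, bk.2.1, bk.2.2 ++ [i])
      else bk) (a, b, c)
    = (a ++ lst.filter pvR, b ++ lst.filter pvP, c ++ lst.filter pvS) := by
  induction lst with
  | nil => intro a b c; simp
  | cons x xs ih =>
    intro a b c
    rw [List.foldl_cons]
    by_cases hR : (pvFirst x == 'R' || pvFirst x == 'r') = true
    · have hP : pvP x = false := by
        simp only [beq_iff_eq, Bool.or_eq_true] at hR
        rcases hR with h | h <;> simp [pvP, pvFirst] at * <;> simp_all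
      have hS : pvS x = false := by
        simp only [beq_iff_eq, Bool.or_eq_true] at hR
        rcases hR with h | h <;> simp [pvS, pvFirst] at * <;> simp_all
      simp only [hR, if_true]
      rw [ih]
      simp [pvR, hR, hP, hS]
    · by_cases hP : (pvFirst x == 'P' || pvFirst x == 'p') = true
      · have hS : pvS x = false := by
          simp only [beq_iff_eq, Bool.or_eq_true] at hP
          rcases hP with h | h <;> simp [pvS, pvFirst] at * <;> simp_all
        simp only [hR, hP, if_true]
        rw [ih]
        simp [pvR, pvP, hR, hP, hS]
      · by_cases hS : (pvFirst x == 'S' || pvFirst x == 's') = true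
        · simp only [hR, hP, hS, if_true]
          rw [ih]
          simp [pvR, pvP, pvS, hR, hP, hS]
        · simp only [hR, hP, hS]
          rw [ih]
          simp [pvR, pvP, pvS, hR, hP, hS]

lemma foldl_append_id (lst : List String) : ∀ (a : List String),
    lst.foldl (fun acc i => acc ++ [i]) a = a ++ lst := by
  induction lst with
  | nil => intro a; simp
  | cons x xs ih => intro a; simp [List.foldl_cons, ih]

lemma foldl_filter (p : String → Bool) (lst : List String) :
    lst.foldl (fun acc i => if p i then acc ++ [i] else acc) [] = lst.filter p := by
  rw [PySem.List.foldl_append_if p (fun x => x) lst []]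
  simp

lemma filter_ne_nil_iff (p : String → Bool) (lst : List String) :
    lst.filter p ≠ [] ↔ 0 < lst.countP p := by
  rw [← List.length_pos_iff_ne_nil, ← List.countP_eq_length_filter]

-- ===== VERDICT (by name: the statement is the Claim_ definition above) =====
theorem battle_in_the_hex_spec : Claim_equal_battle_in_the_hex := by
  intro lst _ _
  unfold Spec_battle_in_the_hex battle_in_the_hex battle_in_the_hex_alt
  rw [counts_eq lst 0 0 0]
  rw [show (fun (bk : List String × List String × List String) i =>
      let c := pvFirst i
      if c == 'R' || c == 'r' then (bk.1 ++ [i], bk.2.1, bk.2.2)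
      else if c == 'P' || c == 'p' then (bk.1, bk.2.1 ++ [i], bk.2.2)
      else if c == 'S' || c == 's' then (bk.1, bk.2.1, bk.2.2 ++ [i])
      else bk) = (fun (bk : List String × List String × List String) i =>
      if pvFirst i == 'R' || pvFirst i == 'r' then (bk.1 ++ [i], bk.2.1, bk.2.2)
      else if pvFirst i == 'P' || pvFirst i == 'p' then (bk.1, bk.2.1 ++ [i], bk.2.2)
      else if pvFirst i == 'S' || pvFirst i == 's' then (bk.1, bk.2.1, bk.2.2 ++ [i])
      else bk) from rfl]
  rw [buckets_eq lst [] [] []]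
  simp only [List.nil_append, Nat.zero_add]
  rw [show (fun (acc : List String) i => if pvFirst i == 'S' || pvFirst i == 's' then acc ++ [i] else acc)
        = (fun (acc : List String) i => if pvS i then acc ++ [i] else acc) from rfl,
      show (fun (acc : List String) i => if pvFirst i == 'P' || pvFirst i == 'p' then acc ++ [i] else acc)
        = (fun (acc : List String) i => if pvP i then acc ++ [i] else acc) from rfl,
      show (fun (acc : List String) i => if pvFirst i == 'R' || pvFirst i == 'r' then acc ++ [i] else acc)
        = (fun (acc : List String) i => if pvR i then acc ++ [i] else acc) from rfl,
      foldl_filter pvS lst, foldl_filter pvP lst, foldl_filter pvR lst,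
      foldl_append_id lst []]
  simp only [ne_eq, filter_ne_nil_iff, List.nil_append]
  split_ifs <;> first | rfl | omega
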